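-- pv_equiv track=rewrite | github.com/raeez/chiral-bar-cobar | compute/lib/cy_nc_deformation_k3e_engine.py | betti_from_hodge
-- ===== SOURCE A (Python) =====
-- from typing import Dict, List, Optional, Tuple
--
-- def betti_from_hodge(h: Dict[Tuple[int, int], int]) -> Dict[int, int]:
--     """Betti numbers b_k = sum_{p+q=k} h^{p,q}."""
--     b: Dict[int, int] = {}
--     for (p, q), v in h.items():
--         if v == 0:
--             continue
--         k = p + q
--         b[k] = b.get(k, 0) + v
--     return b
-- ===== SOURCE B (Python) =====
-- def betti_from_hodge(h):
--     """Betti numbers b_k = sum_{p+q=k} h^{p,q} (group-then-reduce)."""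
--     nz = [(p + q, v) for (p, q), v in h.items() if v != 0]
--     degrees = list(dict.fromkeys(k for k, _ in nz))
--     return {k: sum(v for d, v in nz if d == k) for k in degrees}
-- ===== Notes on version B (the rewrite author's own statement) =====
-- stated objective: alternative
-- what changed: Replaces the single streaming pass with a get-accumulate-overwrite dict by a group-then-reduce decomposition: collect nonzero (degree, value) contributions, dedup the degrees in first-occurrence order, then build each Betti number with a per-degree sum comprehension.
import Mathlib
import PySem

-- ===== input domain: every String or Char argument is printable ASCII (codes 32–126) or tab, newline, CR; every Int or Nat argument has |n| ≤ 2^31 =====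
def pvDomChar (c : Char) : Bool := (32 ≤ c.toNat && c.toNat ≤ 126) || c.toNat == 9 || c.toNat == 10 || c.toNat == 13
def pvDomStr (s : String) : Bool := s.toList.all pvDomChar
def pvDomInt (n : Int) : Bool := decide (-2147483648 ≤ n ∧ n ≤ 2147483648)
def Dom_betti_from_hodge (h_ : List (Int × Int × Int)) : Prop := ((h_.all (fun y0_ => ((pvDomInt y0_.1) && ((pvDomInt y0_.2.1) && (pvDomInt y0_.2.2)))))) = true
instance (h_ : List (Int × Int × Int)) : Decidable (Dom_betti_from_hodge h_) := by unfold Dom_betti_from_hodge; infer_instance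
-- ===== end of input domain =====

-- B replaces A's single streaming accumulate-overwrite pass by a group-then-reduce
-- decomposition (nonzero contributions, deduped degrees, per-degree sums); alternative, not faster.

-- ===== PORT A =====
-- literal port of A: one pass over h.items(), skipping v == 0, accumulating b[k] = b.get(k, 0) + v
def betti_from_hodge (h_ : List (Int × Int × Int)) : List (Int × Int) :=
  (h_.foldl
    (fun b t =>
      if t.2.2 = 0 then b
      else b.insert (t.1 + t.2.1) (b.getD (t.1 + t.2.1) 0 + t.2.2))
    (PySem.Dict.empty : PySem.Dict Int Int)).items

-- ===== PORT B =====
-- literal port of Source B: nz comprehension, degrees = list(dict.fromkeys(...)), per-degree sum comprehension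
def betti_from_hodge_alt (h_ : List (Int × Int × Int)) : List (Int × Int) :=
  let nz : List (Int × Int) :=
    (h_.filter (fun t => !(t.2.2 = 0))).map (fun t => (t.1 + t.2.1, t.2.2))
  let degrees : List Int := PySem.List.dedup (nz.map (fun p => p.1))
  degrees.map (fun k => (k, ((nz.filter (fun p => p.1 == k)).map (fun p => p.2)).sum))

-- ===== PRECONDITION & SPEC =====
def Spec_betti_from_hodge (h_ : List (Int × Int × Int)) (out : List (Int × Int)) : Prop := out = betti_from_hodge_alt h_
instance (h_ : List (Int × Int × Int)) (out : List (Int × Int)) : Decidable (Spec_betti_from_hodge h_ out) := by unfold Spec_betti_from_hodge; infer_instance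

-- ===== CLAIM (what is proved, stated in full; the proofs are below) =====
def Claim_equal_betti_from_hodge : Prop := ∀ (h_ : List (Int × Int × Int)), Dom_betti_from_hodge h_ → Spec_betti_from_hodge h_ (betti_from_hodge h_)

-- ===== LEMMAS AND PROOFS =====

-- getD of A's accumulating insert-fold is the sum of the values whose key matches
theorem getD_foldl_insert_add (l : List (Int × Int)) (d : PySem.Dict Int Int) (c : Int) :
    (l.foldl (fun d p => d.insert p.1 (d.getD p.1 0 + p.2)) d).getD c 0
      = d.getD c 0 + ((l.filter (fun p => p.1 == c)).map (fun p => p.2)).sum := by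
  induction l generalizing d with
  | nil => simp
  | cons p l ih =>
    simp only [List.foldl_cons, ih, List.filter_cons]
    by_cases h : p.1 = c
    · simp [h]
      ring
    · simp [h, PySem.Dict.getD_insert, beq_iff_eq, Ne.symm h]

theorem betti_from_hodge_spec_aux (h_ : List (Int × Int × Int)) :
    betti_from_hodge h_ = betti_from_hodge_alt h_ := by
  unfold betti_from_hodge betti_from_hodge_alt
  set nz : List (Int × Int) :=
    (h_.filter (fun t => !(t.2.2 = 0))).map (fun t => (t.1 + t.2.1, t.2.2)) with hnz
  -- turn A's guarded fold into a fold over the filtered list, then over nz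
  have hstep : h_.foldl
      (fun b t => if t.2.2 = 0 then b
        else b.insert (t.1 + t.2.1) (b.getD (t.1 + t.2.1) 0 + t.2.2))
      (PySem.Dict.empty : PySem.Dict Int Int)
      = nz.foldl (fun d p => d.insert p.1 (d.getD p.1 0 + p.2)) PySem.Dict.empty := by
    rw [hnz, List.foldl_map, List.foldl_filter]
    congr 1
    funext b t
    by_cases h : t.2.2 = 0 <;> simp [h]
  rw [hstep]
  set D := nz.foldl (fun d p => d.insert p.1 (d.getD p.1 0 + p.2))
    (PySem.Dict.empty : PySem.Dict Int Int) with hD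
  have hnd : D.keys.Nodup := by
    rw [hD]
    exact PySem.Dict.nodup_keys_foldl_insert_key nz (fun p => p.1)
      (fun d p => d.getD p.1 0 + p.2) _ PySem.Dict.nodup_keys_empty
  have hkeys : D.keys = PySem.List.dedup (nz.map (fun p => p.1)) := by
    rw [hD, PySem.Dict.keys_foldl_insert_key, PySem.Dict.keys_empty,
      PySem.Set.update_nil_left, PySem.List.dedup_eq_ofList]
  rw [PySem.Dict.items_eq_map_keys D hnd 0, hkeys]
  refine List.map_congr_left ?_
  intro k _
  have := getD_foldl_insert_add nz PySem.Dict.empty k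
  rw [← hD] at this
  simp [this]

-- ===== VERDICT (by name: the statement is the Claim_ definition above) =====
theorem betti_from_hodge_spec : Claim_equal_betti_from_hodge := by
  intro h_ _
  unfold Spec_betti_from_hodge
  exact betti_from_hodge_spec_aux h_
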